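-- pv_equiv track=rewrite | github.com/cortexlabs/cortex | python/serve/cortex_internal/lib/util.py | get_paths_by_prefixes
-- ===== SOURCE A (Python) =====
-- from typing import List, Dict, Optional
--
-- def get_paths_by_prefixes(paths: List[str], prefixes: List[str]) -> Dict[str, List[str]]:
--     paths_by_prefix = {}
--     for path in paths:
--         for prefix in prefixes:
--             if not path.startswith(prefix):
--                 continue
--             if prefix not in paths_by_prefix:
--                 paths_by_prefix[prefix] = [path]
--             else:
--                 paths_by_prefix[prefix].append(path)
--     return paths_by_prefix
-- ===== SOURCE B (Python) =====
-- from typing import List, Dict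
--
--
-- def get_paths_by_prefixes(paths: List[str], prefixes: List[str]) -> Dict[str, List[str]]:
--     # Hash every prefix by its string once; for each path probe its own
--     # len(path)+1 leading substrings instead of scanning the whole prefix list.
--     index_of = {}
--     for i, q in enumerate(prefixes):
--         index_of.setdefault(q, []).append(i)
--     out = {}
--     for path in paths:
--         idxs = []
--         for L in range(len(path) + 1):
--             idxs.extend(index_of.get(path[:L], []))
--         for i in sorted(idxs):
--             out.setdefault(prefixes[i], []).append(path)
--     return out
-- ===== Notes on version B (the rewrite author's own statement) =====
-- stated objective: alternative
-- what changed: B hashes all prefixes into a dict keyed by the prefix string and, per path, probes only the path's own len(path)+1 leading substrings (collecting matching prefix indices and replaying them in index order), instead of A's inner scan over the whole prefix list for every path.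
import Mathlib
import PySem

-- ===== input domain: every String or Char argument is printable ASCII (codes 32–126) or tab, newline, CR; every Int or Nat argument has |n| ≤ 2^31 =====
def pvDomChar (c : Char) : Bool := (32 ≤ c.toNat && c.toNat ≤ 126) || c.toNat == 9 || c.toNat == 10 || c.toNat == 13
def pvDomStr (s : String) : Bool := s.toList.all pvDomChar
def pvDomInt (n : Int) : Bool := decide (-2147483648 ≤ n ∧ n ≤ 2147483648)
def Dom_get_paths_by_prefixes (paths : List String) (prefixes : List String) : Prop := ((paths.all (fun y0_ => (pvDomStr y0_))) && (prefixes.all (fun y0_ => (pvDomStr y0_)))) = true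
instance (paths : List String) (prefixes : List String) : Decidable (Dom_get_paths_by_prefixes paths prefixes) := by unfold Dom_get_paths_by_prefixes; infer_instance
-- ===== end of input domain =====

-- B replaces A's inner scan of the whole prefix list per path by a hash index of the
-- prefixes probed at the path's own leading substrings (a different traversal, same result).

-- ===== PORT A =====
def get_paths_by_prefixes (paths : List String) (prefixes : List String) : List (String × List String) :=
  (paths.foldl (fun d path =>
      prefixes.foldl (fun d pfx =>
        if PySem.Str.startswith path pfx then
          -- `if prefix not in paths_by_prefix: … = [path]  else: ….append(path)`
          (if d.contains pfx = false then d.insert pfx [path]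
           else d.modify pfx [] (fun l => l ++ [path]))
        else d) d)
    PySem.Dict.empty).items

-- ===== PORT B =====
-- index_of.setdefault(q, []).append(i)  ≡  d[q] = d.get(q, []) + [i]  = Dict.modify q [] (· ++ [i])
def pvBuildIndex (prefixes : List String) : PySem.Dict String (List Int) :=
  (PySem.List.enumerate prefixes 0).foldl
    (fun d p => d.modify p.2 [] (fun l => l ++ [p.1])) PySem.Dict.empty

def get_paths_by_prefixes_alt (paths : List String) (prefixes : List String) : List (String × List String) :=
  let indexOf := pvBuildIndex prefixes
  (paths.foldl (fun out path =>
      -- for L in range(len(path)+1): idxs.extend(index_of.get(path[:L], []))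
      -- (path[:L] with 0 ≤ L ≤ len(path) is exactly List.take L on the characters)
      let idxs := (List.range (path.toList.length + 1)).foldl
        (fun acc L => acc ++ indexOf.getD (String.ofList (path.toList.take L)) []) []
      -- for i in sorted(idxs): out.setdefault(prefixes[i], []).append(path)
      -- (i is always a valid index into prefixes, so prefixes[i] is pyGetD with any default)
      (PySem.List.sorted idxs (fun x => x) false).foldl
        (fun out i => out.modify (PySem.List.pyGetD prefixes i "") [] (fun l => l ++ [path])) out)
    PySem.Dict.empty).items

-- ===== PRECONDITION & SPEC =====
def Spec_get_paths_by_prefixes (paths : List String) (prefixes : List String) (out : List (String × List String)) : Prop := out = get_paths_by_prefixes_alt paths prefixes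
instance (paths : List String) (prefixes : List String) (out : List (String × List String)) : Decidable (Spec_get_paths_by_prefixes paths prefixes out) := by unfold Spec_get_paths_by_prefixes; infer_instance

-- ===== CLAIM (what is proved, stated in full; the proofs are below) =====
def Claim_equal_get_paths_by_prefixes : Prop := ∀ (paths : List String) (prefixes : List String), Dom_get_paths_by_prefixes paths prefixes → Spec_get_paths_by_prefixes paths prefixes (get_paths_by_prefixes paths prefixes)

-- ===== LEMMAS AND PROOFS =====

-- the matching (index, prefix) pairs of a path, in prefix-index order
def pvMatches (prefixes : List String) (path : String) : List (Int × String) :=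
  (PySem.List.enumerate prefixes 0).filter (fun p => PySem.Str.startswith path p.2)

def pvTarget (prefixes : List String) (path : String) : List Int :=
  (pvMatches prefixes path).map (fun p => p.1)

def pvBucket (prefixes : List String) (path : String) (L : Nat) : List Int :=
  (pvBuildIndex prefixes).getD (String.ofList (path.toList.take L)) []

def pvCollect (prefixes : List String) (path : String) : List Int :=
  (List.range (path.toList.length + 1)).foldl
    (fun acc L => acc ++ pvBucket prefixes path L) []

lemma pv_getD_build (prefixes : List String) (s : String) :
    (pvBuildIndex prefixes).getD s [] =
      ((PySem.List.enumerate prefixes 0).filter (fun p => p.2 == s)).map (fun p => p.1) := by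
  unfold pvBuildIndex
  have h := (List.foldl_map (f := Prod.swap)
    (g := fun (d : PySem.Dict String (List Int)) (p : String × Int) => d.modify p.1 [] (fun l => l ++ [p.2]))
    (l := PySem.List.enumerate prefixes 0) (init := PySem.Dict.empty))
  rw [show (List.foldl (fun (d : PySem.Dict String (List Int)) p => d.modify p.2 [] (fun l => l ++ [p.1]))
        PySem.Dict.empty (PySem.List.enumerate prefixes 0))
      = List.foldl (fun (d : PySem.Dict String (List Int)) (p : String × Int) => d.modify p.1 [] (fun l => l ++ [p.2]))
        PySem.Dict.empty ((PySem.List.enumerate prefixes 0).map Prod.swap) from h.symm]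
  rw [PySem.Dict.getD_foldl_modify_append]
  simp [List.filter_map, List.map_map, Function.comp_def]

lemma pv_collect_eq_flatMap (prefixes : List String) (path : String) :
    pvCollect prefixes path =
      (List.range (path.toList.length + 1)).flatMap (pvBucket prefixes path) := by
  unfold pvCollect
  rw [PySem.List.foldl_append_eq_flatMap]
  simp

lemma pv_mem_bucket_iff (prefixes : List String) (path : String) (L : Nat) (i : Int) :
    i ∈ pvBucket prefixes path L ↔
      ∃ q, (i, q) ∈ PySem.List.enumerate prefixes 0 ∧ q.toList = path.toList.take L := by
  unfold pvBucket
  rw [pv_getD_build]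
  simp only [List.mem_map, List.mem_filter, beq_iff_eq]
  constructor
  · rintro ⟨p, ⟨hp, hs⟩, rfl⟩
    exact ⟨p.2, by simpa using hp, by rw [hs]; simp⟩
  · rintro ⟨q, hq, ht⟩
    exact ⟨(i, q), ⟨hq, by rw [← ht]; simp⟩, rfl⟩

lemma pv_mem_collect_iff (prefixes : List String) (path : String) (i : Int) :
    i ∈ pvCollect prefixes path ↔ i ∈ pvTarget prefixes path := by
  rw [pv_collect_eq_flatMap]
  simp only [List.mem_flatMap, List.mem_range, pv_mem_bucket_iff,
    pvTarget, pvMatches, List.mem_map, List.mem_filter]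
  constructor
  · rintro ⟨L, hL, q, hq, ht⟩
    refine ⟨(i, q), ⟨hq, ?_⟩, rfl⟩
    simp only [PySem.Str.startswith_eq]
    rw [PySem.Chars.startswith_iff, ht]
    exact List.take_prefix _ _
  · rintro ⟨p, ⟨hp, hsw⟩, rfl⟩
    have hpre : p.2.toList <+: path.toList := by
      rw [← PySem.Chars.startswith_iff, ← PySem.Str.startswith_eq]; exact hsw
    refine ⟨p.2.toList.length, by
        have := hpre.length_le; omega, p.2, hp, ?_⟩
    exact List.prefix_iff_eq_take.mp hpre

lemma pv_bucket_nodup (prefixes : List String) (path : String) (L : Nat) :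
    (pvBucket prefixes path L).Nodup := by
  unfold pvBucket
  rw [pv_getD_build]
  have h1 := PySem.List.pairwise_lt_enumerate prefixes 0
  have h2 := h1.filter (fun p => p.2 == String.ofList (path.toList.take L))
  have h3 : (((PySem.List.enumerate prefixes 0).filter
      (fun p => p.2 == String.ofList (path.toList.take L))).map (fun p => p.1)).Pairwise (· < ·) := by
    rw [List.pairwise_map]; exact h2
  exact h3.imp ne_of_lt

lemma pv_target_pairwise (prefixes : List String) (path : String) :
    (pvTarget prefixes path).Pairwise (· < ·) := by
  unfold pvTarget pvMatches
  rw [List.pairwise_map]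
  exact (PySem.List.pairwise_lt_enumerate prefixes 0).filter _

lemma pv_collect_nodup (prefixes : List String) (path : String) :
    (pvCollect prefixes path).Nodup := by
  rw [pv_collect_eq_flatMap]
  rw [List.nodup_flatMap]
  refine ⟨fun L _ => pv_bucket_nodup prefixes path L, ?_⟩
  have hdisj : ∀ L L' : Nat, L ∈ List.range (path.toList.length + 1) →
      L' ∈ List.range (path.toList.length + 1) → L ≠ L' →
      List.Disjoint (pvBucket prefixes path L) (pvBucket prefixes path L') := by
    intro L L' hL hL' hne i hiL hiL'
    obtain ⟨q, hq, ht⟩ := (pv_mem_bucket_iff prefixes path L i).mp hiL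
    obtain ⟨q', hq', ht'⟩ := (pv_mem_bucket_iff prefixes path L' i).mp hiL'
    -- the same first component in `enumerate` forces the same pair
    obtain ⟨k, hk, hpk⟩ := (PySem.List.mem_enumerate_iff _ _ _).mp hq
    obtain ⟨k', hk', hpk'⟩ := (PySem.List.mem_enumerate_iff _ _ _).mp hq'
    have hik : (i, q) = ((k : Int), prefixes[k]) := by simpa using hpk
    have hik' : (i, q') = ((k' : Int), prefixes[k']) := by simpa using hpk'
    have hkk : k = k' := by
      have h1 : i = (k : Int) := (Prod.mk.injEq _ _ _ _ ▸ hik).1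
      have h2 : i = (k' : Int) := (Prod.mk.injEq _ _ _ _ ▸ hik').1
      omega
    have hqq : q = q' := by
      subst hkk
      have := hik.trans hik'.symm
      exact (Prod.mk.injEq _ _ _ _ ▸ this).2
    apply hne
    have heq : path.toList.take L = path.toList.take L' := by rw [← ht, hqq, ht']
    have hlen := congrArg List.length heq
    simp only [List.length_take, List.mem_range] at hlen hL hL'
    omega
  have hrange : (List.range (path.toList.length + 1)).Pairwise (· < ·) := List.pairwise_lt_range
  refine hrange.imp_of_mem ?_
  intro a b ha hb hab
  exact hdisj a b ha hb (Nat.ne_of_lt hab)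

lemma pv_sorted_collect (prefixes : List String) (path : String) :
    PySem.List.sorted (pvCollect prefixes path) (fun x => x) = pvTarget prefixes path := by
  apply PySem.List.sorted_eq_of_perm_of_pairwise_lt
  · exact (List.perm_ext_iff_of_nodup
      (((pv_target_pairwise prefixes path)).imp ne_of_lt)
      (pv_collect_nodup prefixes path)).mpr
      (fun i => (pv_mem_collect_iff prefixes path i).symm)
  · exact pv_target_pairwise prefixes path

lemma pv_map_target (prefixes : List String) (path : String) :
    (pvTarget prefixes path).map (fun i => PySem.List.pyGetD prefixes i "") =
      prefixes.filter (fun q => PySem.Str.startswith path q) := by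
  unfold pvTarget pvMatches
  rw [List.map_map]
  have hcongr : ∀ p ∈ (PySem.List.enumerate prefixes 0).filter (fun p => PySem.Str.startswith path p.2),
      ((fun i => PySem.List.pyGetD prefixes i "") ∘ fun p : Int × String => p.1) p = p.2 := by
    intro p hp
    obtain ⟨k, hk, rfl⟩ := (PySem.List.mem_enumerate_iff _ _ _).mp (List.mem_of_mem_filter hp)
    simp [PySem.List.pyGetD_natCast, List.getD_eq_getElem?_getD, hk]
  rw [List.map_congr_left hcongr]
  rw [show (fun p : Int × String => PySem.Str.startswith path p.2)
      = ((fun q => PySem.Str.startswith path q) ∘ (fun p : Int × String => p.2)) from rfl,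
    ← List.filter_map, PySem.List.map_snd_enumerate]

-- A's "absent: d[q] = [path] / present: append" step is exactly `modify q [] (· ++ [path])`
lemma pv_step_eq (path : String) (d : PySem.Dict String (List String)) (q : String) :
    (if d.contains q = false then d.insert q [path]
     else d.modify q [] (fun l => l ++ [path])) = d.modify q [] (fun l => l ++ [path]) := by
  by_cases h : d.contains q = false
  · simp [PySem.Dict.modify, PySem.Dict.getD_of_not_contains, h]
  · simp [h]

lemma pv_A_inner (prefixes : List String) (path : String) (d : PySem.Dict String (List String)) :
    prefixes.foldl (fun d pfx =>
        if PySem.Str.startswith path pfx then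
          (if d.contains pfx = false then d.insert pfx [path]
           else d.modify pfx [] (fun l => l ++ [path]))
        else d) d =
      (prefixes.filter (fun q => PySem.Str.startswith path q)).foldl
        (fun d q => d.modify q [] (fun l => l ++ [path])) d := by
  rw [List.foldl_filter]
  congr 1
  funext d q
  by_cases h : PySem.Str.startswith path q = true
  · rw [if_pos h, if_pos h, pv_step_eq]
  · rw [if_neg h, if_neg h]

lemma pv_B_inner (prefixes : List String) (path : String) (d : PySem.Dict String (List String)) :
    (PySem.List.sorted (pvCollect prefixes path) (fun x => x) false).foldl
        (fun out i => out.modify (PySem.List.pyGetD prefixes i "") [] (fun l => l ++ [path])) d =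
      (prefixes.filter (fun q => PySem.Str.startswith path q)).foldl
        (fun d q => d.modify q [] (fun l => l ++ [path])) d := by
  rw [pv_sorted_collect, ← pv_map_target, List.foldl_map]

-- ===== VERDICT (by name: the statement is the Claim_ definition above) =====
theorem get_paths_by_prefixes_spec : Claim_equal_get_paths_by_prefixes := by
  intro paths prefixes _
  unfold Spec_get_paths_by_prefixes get_paths_by_prefixes get_paths_by_prefixes_alt
  have h : ∀ (d : PySem.Dict String (List String)) (path : String),
      prefixes.foldl (fun d pfx =>
        if PySem.Str.startswith path pfx then
          (if d.contains pfx = false then d.insert pfx [path]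
           else d.modify pfx [] (fun l => l ++ [path]))
        else d) d =
      (PySem.List.sorted ((List.range (path.toList.length + 1)).foldl
          (fun acc L => acc ++ (pvBuildIndex prefixes).getD (String.ofList (path.toList.take L)) []) [])
          (fun x => x) false).foldl
        (fun out i => out.modify (PySem.List.pyGetD prefixes i "") [] (fun l => l ++ [path])) d := by
    intro d path
    rw [pv_A_inner, show ((List.range (path.toList.length + 1)).foldl
          (fun acc L => acc ++ (pvBuildIndex prefixes).getD (String.ofList (path.toList.take L)) []) [])
        = pvCollect prefixes path from rfl, pv_B_inner]
  congr 1
  exact congrArg (fun f => List.foldl f PySem.Dict.empty paths) (funext fun d => funext fun path => h d path)
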